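-- pv_equiv track=rewrite | github.com/BojarLab/glycowork | glycowork/glycan_data/loader.py | replace_every_second
-- ===== SOURCE A (Python) =====
-- def replace_every_second(string: str, old_char: str, new_char: str) -> str:
--   """function to replace every second occurrence of old_char in string with new_char\n
--   | Arguments:
--   | :-
--   | string (string): a string
--   | old_char (string): a string character to be replaced (every second occurrence)
--   | new_char (string): the string character to replace old_char with\n
--   | Returns:
--   | :-
--   | Returns string with replaced characters"""
--   count = 0
--   result = []
--   for char in string:
--     if char == old_char:
--       count += 1
--       result.append(new_char if count % 2 == 0 else char)
--     else:
--       result.append(char)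
--   return ''.join(result)
-- ===== SOURCE B (Python) =====
-- def replace_every_second(string: str, old_char: str, new_char: str) -> str:
--   """Split on old_char; the gaps between parts are exactly its occurrences.
--   Rebuild by re-inserting old_char at odd occurrences and new_char at even ones."""
--   if len(old_char) != 1:
--     return string  # A only ever matches a single character
--   parts = string.split(old_char)
--   pieces = [parts[0]]
--   for i, part in enumerate(parts[1:], start=1):
--     pieces.append(old_char if i % 2 == 1 else new_char)
--     pieces.append(part)
--   return ''.join(pieces)
-- ===== Notes on version B (the rewrite author's own statement) =====
-- stated objective: faster
-- what changed: A counts occurrences in a per-character Python loop with an accumulator list; B splits the string on old_char once and rejoins the parts, re-inserting old_char at odd and new_char at even occurrences (guarding len(old_char)==1, the only case A can match).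
import Mathlib
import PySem

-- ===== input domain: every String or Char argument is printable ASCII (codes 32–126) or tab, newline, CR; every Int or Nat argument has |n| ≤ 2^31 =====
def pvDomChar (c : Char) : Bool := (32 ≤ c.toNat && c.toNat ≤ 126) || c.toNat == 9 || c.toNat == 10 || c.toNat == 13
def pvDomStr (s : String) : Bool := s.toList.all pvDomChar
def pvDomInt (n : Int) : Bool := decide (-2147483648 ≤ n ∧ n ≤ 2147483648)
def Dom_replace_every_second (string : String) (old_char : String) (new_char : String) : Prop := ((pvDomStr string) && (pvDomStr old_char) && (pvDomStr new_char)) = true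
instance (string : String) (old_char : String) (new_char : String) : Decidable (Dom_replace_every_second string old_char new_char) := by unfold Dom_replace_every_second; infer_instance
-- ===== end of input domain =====

-- B rebuilds the string from string.split(old_char), re-inserting old_char at odd and new_char at
-- even occurrences, instead of A's per-char counter loop (measured faster in a timing run).

-- ===== PORT A =====
-- counter loop: for char in string, count matches, append new_char at even counts
def replace_every_second (string : String) (old_char : String) (new_char : String) : String :=
  let st := string.toList.foldl
    (fun (st : Int × List String) c =>
      if String.ofList [c] == old_char then
        let count := st.1 + 1
        (count, st.2 ++ [if PySem.Int.mod count 2 == 0 then new_char else String.ofList [c]])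
      else
        (st.1, st.2 ++ [String.ofList [c]]))
    (0, [])
  PySem.Str.join "" st.2

-- ===== PORT B =====
-- split on old_char, then re-interleave the parts with alternating separators
def replace_every_second_alt (string : String) (old_char : String) (new_char : String) : String :=
  if PySem.Str.len old_char ≠ 1 then string
  else
    let parts := (PySem.Chars.splitOn string.toList old_char.toList).map String.ofList
    let pieces := (PySem.List.enumerate (PySem.List.slice parts (some 1) none) 1).foldl
      (fun (acc : List String) ip =>
        acc ++ [if PySem.Int.mod ip.1 2 == 1 then old_char else new_char, ip.2])
      [PySem.List.pyGetD parts 0 ""]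
    PySem.Str.join "" pieces

-- ===== PRECONDITION & SPEC =====
def Spec_replace_every_second (string : String) (old_char : String) (new_char : String) (out : String) : Prop := out = replace_every_second_alt string old_char new_char
instance (string : String) (old_char : String) (new_char : String) (out : String) : Decidable (Spec_replace_every_second string old_char new_char out) := by unfold Spec_replace_every_second; infer_instance

-- ===== CLAIM (what is proved, stated in full; the proofs are below) =====
def Claim_equal_replace_every_second : Prop := ∀ (string : String) (old_char : String) (new_char : String), Dom_replace_every_second string old_char new_char → Spec_replace_every_second string old_char new_char (replace_every_second string old_char new_char)

-- ===== LEMMAS AND PROOFS =====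

-- clean recursive form of splitting on a single character d
def pvSpl (d : Char) : List Char → List (List Char)
  | [] => [[]]
  | c :: t => if c = d then [] :: pvSpl d t
              else (c :: (pvSpl d t).headD []) :: (pvSpl d t).tail

-- the common char-level specification: replace every second occurrence of d
def pvRep (d : Char) (nc : List Char) : List Char → Bool → List Char
  | [], _ => []
  | c :: t, p => if c = d then (if p then nc else [d]) ++ pvRep d nc t (!p)
                 else c :: pvRep d nc t p

-- interleave parts with alternating separators ([d] first when p = false)
def pvIlv (d : Char) (nc : List Char) : List (List Char) → Bool → List Char
  | [], _ => []
  | q :: qs, p => (if p then nc else [d]) ++ q ++ pvIlv d nc qs (!p)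

theorem pvSpl_ne_nil (d : Char) (l : List Char) : pvSpl d l ≠ [] := by
  cases l with
  | nil => simp [pvSpl]
  | cons c t => simp only [pvSpl]; split <;> simp

theorem pv_go_eq (d : Char) (fuel : Nat) :
    ∀ (l cur : List Char) (acc : List (List Char)), l.length < fuel →
    PySem.Chars.splitOn.go [d] fuel l cur acc
      = acc.reverse ++ (pvSpl d l).modifyHead (cur.reverse ++ ·) := by
  induction fuel with
  | zero => intro l cur acc h; omega
  | succ f ih =>
    intro l cur acc h
    cases l with
    | nil => simp [PySem.Chars.splitOn.go, pvSpl]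
    | cons c t =>
      by_cases hc : d = c
      · subst hc
        rw [show PySem.Chars.splitOn.go [d] (f+1) (d :: t) cur acc
              = PySem.Chars.splitOn.go [d] f t [] (cur.reverse :: acc) by
            simp [PySem.Chars.splitOn.go, List.isPrefixOf]]
        rw [ih t [] _ (by simpa using h)]
        obtain ⟨hd, r, e⟩ := List.exists_cons_of_ne_nil (pvSpl_ne_nil d t)
        simp [pvSpl, e]
      · rw [show PySem.Chars.splitOn.go [d] (f+1) (c :: t) cur acc
              = PySem.Chars.splitOn.go [d] f t (c :: cur) acc by
            simp [PySem.Chars.splitOn.go, List.isPrefixOf, hc]]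
        rw [ih t (c :: cur) acc (by simpa using h)]
        obtain ⟨hd, r, e⟩ := List.exists_cons_of_ne_nil (pvSpl_ne_nil d t)
        simp [pvSpl, e, Ne.symm hc]

theorem pv_splitOn_eq (d : Char) (l : List Char) :
    PySem.Chars.splitOn l [d] = pvSpl d l := by
  rw [show PySem.Chars.splitOn l [d] = PySem.Chars.splitOn.go [d] (l.length + 1) l [] [] from rfl]
  rw [pv_go_eq d (l.length + 1) l [] [] (by omega)]
  obtain ⟨hd, r, e⟩ := List.exists_cons_of_ne_nil (pvSpl_ne_nil d l)
  simp [e]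

theorem pv_join_nil (xss : List (List Char)) : PySem.Chars.join [] xss = xss.flatten := by
  induction xss with
  | nil => simp [PySem.Chars.join_nil]
  | cons p rest ih =>
    cases rest with
    | nil => simp [PySem.Chars.join_singleton]
    | cons q r => rw [PySem.Chars.join_cons_cons]; simp [ih]

theorem pv_ofList_inj {a b : List Char} (h : String.ofList a = String.ofList b) : a = b := by
  simpa using congrArg String.toList h

-- A's loop, single-character old_char: it computes pvRep
theorem pv_A_loop (o n : String) (d : Char) (ho : o.toList = [d]) (l : List Char) :
    ∀ (cnt : Int) (acc : List String),
    (((List.foldl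
        (fun (st : Int × List String) c =>
          if String.ofList [c] == o then
            (st.1 + 1, st.2 ++ [if PySem.Int.mod (st.1 + 1) 2 == 0 then n else String.ofList [c]])
          else
            (st.1, st.2 ++ [String.ofList [c]])) (cnt, acc) l).2).map String.toList).flatten
      = ((acc.map String.toList).flatten) ++ pvRep d n.toList l (PySem.Int.mod cnt 2 == 1) := by
  have ho' : o = String.ofList [d] := by rw [← ho, String.ofList_toList]
  have hcd : ∀ c : Char, (String.ofList [c] == o) = (c == d) := by
    intro c
    rw [ho']
    by_cases h : c = d
    · simp [h]
    · have hne : String.ofList [c] ≠ String.ofList [d] := fun he =>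
        h (by simpa using pv_ofList_inj he)
      simp [h, hne]
  induction l with
  | nil => intro cnt acc; simp [pvRep]
  | cons c t ih =>
    intro cnt acc
    simp only [List.foldl_cons, hcd c]
    by_cases h : c = d
    · subst h
      simp only [BEq.rfl, if_true]
      rw [ih (cnt + 1) _]
      rcases Int.emod_two_eq cnt with hm | hm
      · have hp1 : (cnt + 1) % 2 = 1 := by omega
        have hp2 : ¬ (2 : Int) ∣ (cnt + 1) := by omega
        simp [pvRep, hm, hp1]
      · have hp1 : (cnt + 1) % 2 = 0 := by omega
        have hp2 : (2 : Int) ∣ (cnt + 1) := by omega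
        simp [pvRep, hm, hp1]
    · simp only [beq_eq_false_iff_ne.mpr h, Bool.false_eq_true, if_false]
      rw [ih cnt _]
      simp [pvRep, h]

-- A's loop when old_char is not a single character: nothing ever matches
theorem pv_A_loop_id (o n : String) (ho : o.toList.length ≠ 1) (l : List Char) :
    ∀ (cnt : Int) (acc : List String),
    (((List.foldl
        (fun (st : Int × List String) c =>
          if String.ofList [c] == o then
            (st.1 + 1, st.2 ++ [if PySem.Int.mod (st.1 + 1) 2 == 0 then n else String.ofList [c]])
          else
            (st.1, st.2 ++ [String.ofList [c]])) (cnt, acc) l).2).map String.toList).flatten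
      = ((acc.map String.toList).flatten) ++ l := by
  have hcd : ∀ c : Char, (String.ofList [c] == o) = false := by
    intro c
    simp only [beq_eq_false_iff_ne, ne_eq]
    intro he
    apply ho
    rw [← he]
    simp
  induction l with
  | nil => intro cnt acc; simp
  | cons c t ih =>
    intro cnt acc
    simp only [List.foldl_cons, hcd c, Bool.false_eq_true, if_false]
    rw [ih cnt _]
    simp

-- B's loop: interleaving the tail parts with alternating separators
theorem pv_B_loop (o n : String) (d : Char) (ho : o.toList = [d]) (parts : List String) :
    ∀ (i : Int) (acc : List String),
    (((List.foldl
        (fun (acc : List String) (ip : Int × String) =>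
          acc ++ [if PySem.Int.mod ip.1 2 == 1 then o else n, ip.2])
        acc (PySem.List.enumerate parts i)).map String.toList).flatten)
      = ((acc.map String.toList).flatten)
        ++ pvIlv d n.toList (parts.map String.toList) (PySem.Int.mod i 2 == 0) := by
  induction parts with
  | nil => intro i acc; simp [PySem.List.enumerate_nil, pvIlv]
  | cons q qs ih =>
    intro i acc
    rw [PySem.List.enumerate_cons, List.foldl_cons, ih (i + 1) _]
    simp only [pvIlv, List.map_cons]
    rcases Int.emod_two_eq i with hm | hm
    · have hp1 : (i + 1) % 2 = 1 := by omega
      have hp2 : (2 : Int) ∣ i := by omega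
      simp [hm, hp1]
    · have hp1 : (i + 1) % 2 = 0 := by omega
      have hp2 : ¬ (2 : Int) ∣ i := by omega
      simp [hm, hp1, ho]

-- the bridge: pvRep on l is head-of-split followed by the interleaved tail
theorem pv_rep_eq (d : Char) (nc : List Char) (l : List Char) : ∀ (p : Bool),
    pvRep d nc l p = (pvSpl d l).headD [] ++ pvIlv d nc (pvSpl d l).tail p := by
  induction l with
  | nil => intro p; simp [pvRep, pvSpl, pvIlv]
  | cons c t ih =>
    intro p
    by_cases hc : c = d
    · subst hc
      obtain ⟨hd, r, e⟩ := List.exists_cons_of_ne_nil (pvSpl_ne_nil c t)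
      simp only [pvRep, pvSpl, e, List.headD_cons, List.tail_cons]
      rw [ih (!p)]
      simp [pvIlv, e]
    · obtain ⟨hd, r, e⟩ := List.exists_cons_of_ne_nil (pvSpl_ne_nil d t)
      simp only [pvRep, pvSpl, if_neg hc, e, List.headD_cons, List.tail_cons]
      rw [ih p]
      simp [e]

theorem pv_toList_eq {a b : String} (h : a.toList = b.toList) : a = b := by
  rw [← String.ofList_toList (s := a), h, String.ofList_toList]

-- ===== VERDICT (by name: the statement is the Claim_ definition above) =====
theorem replace_every_second_spec : Claim_equal_replace_every_second := by
  intro s o n _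
  unfold Spec_replace_every_second
  by_cases h1 : o.toList.length = 1
  · obtain ⟨d, hd⟩ := List.length_eq_one_iff.mp h1
    apply pv_toList_eq
    rw [replace_every_second, replace_every_second_alt]
    rw [if_neg (by simp [PySem.Str.len_eq, h1])]
    simp only [hd, pv_splitOn_eq]
    obtain ⟨hh, r, e⟩ := List.exists_cons_of_ne_nil (pvSpl_ne_nil d s.toList)
    rw [e]
    rw [PySem.Str.toList_join, PySem.Str.toList_join]
    have hsep : ("" : String).toList = [] := by decide
    rw [hsep, pv_join_nil, pv_join_nil]
    rw [PySem.List.slice_from _ (by norm_num)]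
    simp only [List.map_cons, Int.toNat_one, List.drop_succ_cons, List.drop_zero]
    rw [show PySem.List.pyGetD (String.ofList hh :: r.map String.ofList) 0 "" = String.ofList hh by
      simp [PySem.List.pyGetD, PySem.List.pyGet?, PySem.List.pyIdx?]]
    rw [pv_B_loop o n d hd (r.map String.ofList) 1 [String.ofList hh]]
    rw [pv_A_loop o n d hd s.toList 0 []]
    rw [pv_rep_eq d n.toList s.toList]
    simp [e, Function.comp_def]
  · apply pv_toList_eq
    rw [replace_every_second, replace_every_second_alt]
    rw [if_pos (by simp only [PySem.Str.len_eq]; exact_mod_cast h1)]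
    rw [PySem.Str.toList_join]
    have hsep : ("" : String).toList = [] := by decide
    rw [hsep, pv_join_nil]
    rw [pv_A_loop_id o n h1 s.toList 0 []]
    simp
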